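-- pv_equiv track=rewrite | github.com/MatviyPleskach/4mp1 | 8.py | smth
-- ===== SOURCE A (Python) =====
-- def smth(y,j):
--     mas=[]
--     for i in range(len(y)):
--         mas.append(y[i] - y[i-1])
--     mas.pop(0)
--     if j == 1:
--       return mas
--     else:
--       j-=1
--       return smth(mas, j)
-- ===== SOURCE B (Python) =====
-- def smth(y, j):
--     while True:
--         prev, rest = y[0], y[1:]   # IndexError on an empty list, as in A
--         mas = []
--         for v in rest:
--             mas.append(v - prev)
--             prev = v
--         if j == 1:
--             return mas
--         j -= 1
--         y = mas
-- ===== Notes on version B (the rewrite author's own statement) =====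
-- stated objective: simpler
-- what changed: A builds each difference pass by indexing over range(len(y)) with a wraparound y[i]-y[i-1] term that it then deletes via pop(0), and drives the j repetitions by recursion; B computes each pass with a running-previous accumulator over y[1:] (no indexing, no wraparound element, no pop) and repeats it with a while loop that decrements j in place.
import Mathlib
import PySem

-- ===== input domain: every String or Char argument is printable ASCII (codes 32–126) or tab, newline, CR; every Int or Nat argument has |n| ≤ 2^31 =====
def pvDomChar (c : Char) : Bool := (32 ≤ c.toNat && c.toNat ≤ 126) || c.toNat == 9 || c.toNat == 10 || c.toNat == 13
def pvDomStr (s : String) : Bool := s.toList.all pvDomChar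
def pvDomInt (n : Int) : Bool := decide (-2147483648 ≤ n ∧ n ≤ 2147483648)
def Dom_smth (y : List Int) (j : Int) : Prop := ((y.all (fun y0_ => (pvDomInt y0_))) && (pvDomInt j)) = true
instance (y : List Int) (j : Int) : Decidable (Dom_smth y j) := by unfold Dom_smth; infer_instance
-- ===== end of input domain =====

-- B replaces A's per-pass wraparound-index build plus pop(0) and its recursion on j by a
-- running-previous accumulator pass over y[1:] driven by a while loop; simpler, same cost.

-- ===== PORT A =====
def smth (y : List Int) (j : Int) : List Int :=
  -- mas = []; for i in range(len(y)): mas.append(y[i] - y[i-1])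
  let mas := (List.range y.length).map
    (fun (i : Nat) => (PySem.List.pyGet? y (i : Int)).getD 0 - (PySem.List.pyGet? y ((i : Int) - 1)).getD 0)
  -- mas.pop(0)  (IndexError on empty mas → outside Pre_; port returns [])
  match h : PySem.List.pop? mas 0 with
  | none => []
  | some r =>
    if j == 1 then r.2
    else smth r.2 (j - 1)
termination_by y.length
decreasing_by
  have hl := PySem.List.length_of_pop?_eq_some _ h
  simp only [mas, List.length_map, List.length_range] at hl
  omega

-- ===== PORT B =====
-- the inner 'for v in rest' accumulator loop of Source B (helper; its length lemma is cited by
-- the termination proof below)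
def passB (rest : List Int) (acc : List Int) (prev : Int) : List Int × Int :=
  rest.foldl (fun (st : List Int × Int) v => (st.1 ++ [v - st.2], v)) (acc, prev)

lemma passB_length : ∀ (rest acc : List Int) (prev : Int),
    (passB rest acc prev).1.length = acc.length + rest.length := by
  intro rest
  induction rest with
  | nil => simp [passB]
  | cons v vs ih =>
    intro acc p
    simp only [passB, List.foldl_cons] at ih ⊢
    rw [ih]
    simp [List.length_append]
    omega

def smth_alt (y : List Int) (j : Int) : List Int :=
  -- while True: prev, rest = y[0], y[1:]; …
  match y with
  | [] => []  -- y[0] raises IndexError (outside Pre_)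
  | prev :: rest =>
    -- mas = []; for v in rest: mas.append(v - prev); prev = v
    let mas := (passB rest [] prev).1
    if j == 1 then mas
    else smth_alt mas (j - 1)   -- j -= 1; y = mas; loop again
termination_by y.length
decreasing_by
  simp only [passB_length, List.length_nil, List.length_cons]
  omega

-- ===== PRECONDITION & SPEC =====
-- Pre_ admits exactly the inputs on which the Pythons return: otherwise the working list
-- becomes empty before j reaches 1 (or j < 1 shrinks it away) and both raise IndexError.
def Pre_smth (y : List Int) (j : Int) : Prop := 1 ≤ j ∧ j ≤ (y.length : Int)
instance (y : List Int) (j : Int) : Decidable (Pre_smth y j) := by unfold Pre_smth; infer_instance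
def pvWitness_smth : List Int × Int := ([3, 1, 4, 1, 5], 2)

def Spec_smth (y : List Int) (j : Int) (out : List Int) : Prop := out = smth_alt y j
instance (y : List Int) (j : Int) (out : List Int) : Decidable (Spec_smth y j out) := by unfold Spec_smth; infer_instance

-- ===== CLAIM (what is proved, stated in full; the proofs are below) =====
def Claim_equal_smth : Prop := ∀ (y : List Int) (j : Int), Dom_smth y j → Pre_smth y j → Spec_smth y j (smth y j)

-- ===== LEMMAS AND PROOFS =====

-- one successive-difference pass
def dstep (y : List Int) : List Int := List.zipWith (fun a b => b - a) y y.tail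

lemma dstep_length (y : List Int) : (dstep y).length = y.length - 1 := by
  simp [dstep, List.length_tail]

-- A's pass (build with wraparound index, pop index 0) yields exactly dstep y on nonempty y
lemma popA_eq_dstep (y : List Int) (hy : y ≠ []) :
    PySem.List.pop? ((List.range y.length).map
      (fun (i : Nat) => (PySem.List.pyGet? y (i : Int)).getD 0 - (PySem.List.pyGet? y ((i : Int) - 1)).getD 0)) 0
    = some ((PySem.List.pyGet? y 0).getD 0 - (PySem.List.pyGet? y (-1)).getD 0, dstep y) := by
  have hn : 0 < y.length := List.length_pos_iff.mpr hy
  have hmas : (List.range y.length).map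
      (fun (i : Nat) => (PySem.List.pyGet? y (i : Int)).getD 0 - (PySem.List.pyGet? y ((i : Int) - 1)).getD 0)
      = ((PySem.List.pyGet? y 0).getD 0 - (PySem.List.pyGet? y (-1)).getD 0) :: dstep y := by
    apply List.ext_getElem
    · simp [dstep, List.length_tail]; omega
    · intro k hk hk'
      rcases k with _ | k
      · simp [List.getElem_range, PySem.List.pyGet?_zero]
      · have hk1 : k + 1 < y.length := by simpa using hk
        have hkl : k < y.length := by omega
        have hkt : k < y.tail.length := by simp [List.length_tail]; omega
        simp only [List.getElem_map, List.getElem_range, List.getElem_cons_succ, dstep,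
          List.getElem_zipWith]
        have h1 : PySem.List.pyGet? y ((k + 1 : Nat) : Int) = some y[k + 1] := by
          rw [PySem.List.pyGet?_natCast]; simp [hk1]
        have h2 : PySem.List.pyGet? y (((k + 1 : Nat) : Int) - 1) = some y[k] := by
          have he : (((k + 1 : Nat) : Int) - 1) = ((k : Nat) : Int) := by push_cast; ring
          rw [he, PySem.List.pyGet?_natCast]
          simp [hkl]
        rw [h1, h2]
        simp [List.getElem_tail]
  rw [hmas, PySem.List.pop?_zero_cons]

lemma smth_unfold (y : List Int) (j : Int) (hy : y ≠ []) :
    smth y j = if j == 1 then dstep y else smth (dstep y) (j - 1) := by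
  have hpop := popA_eq_dstep y hy
  rw [smth]
  split
  next h => rw [hpop] at h; cases h
  next r h => rw [hpop] at h; cases h; rfl

-- B's accumulator pass yields exactly dstep y
lemma foldB_eq_dstep : ∀ (rest acc : List Int) (prev : Int),
    (passB rest acc prev).1 = acc ++ dstep (prev :: rest) := by
  intro rest
  induction rest with
  | nil => simp [passB, dstep]
  | cons v vs ih =>
    intro acc prev
    simp only [passB, List.foldl_cons] at ih ⊢
    rw [ih]
    simp [dstep, List.append_assoc]

lemma smth_alt_unfold (prev : Int) (rest : List Int) (j : Int) :
    smth_alt (prev :: rest) j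
      = if j == 1 then dstep (prev :: rest) else smth_alt (dstep (prev :: rest)) (j - 1) := by
  rw [smth_alt]
  simp only [foldB_eq_dstep rest [] prev, List.nil_append]

lemma smth_eq_alt : ∀ (n : Nat) (y : List Int) (j : Int),
    j = (n : Int) + 1 → j ≤ (y.length : Int) → smth y j = smth_alt y j := by
  intro n
  induction n with
  | zero =>
    intro y j hj hlen
    have hj1 : j = 1 := by push_cast at hj; omega
    match y with
    | [] => simp at hlen; omega
    | prev :: rest =>
      rw [smth_unfold (prev :: rest) j (by simp), smth_alt_unfold prev rest j]
      simp [hj1]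
  | succ m ih =>
    intro y j hj hlen
    match y with
    | [] => simp at hlen; omega
    | prev :: rest =>
      rw [smth_unfold (prev :: rest) j (by simp), smth_alt_unfold prev rest j]
      have hne : (j == 1) = false := by
        simp only [beq_eq_false_iff_ne]
        push_cast at hj; omega
      simp only [hne, Bool.false_eq_true, if_false]
      have hdl := dstep_length (prev :: rest)
      have hlen' : j - 1 ≤ ((dstep (prev :: rest)).length : Int) := by
        simp only [hdl, List.length_cons]
        simp only [List.length_cons] at hlen
        push_cast at hlen ⊢
        omega
      exact ih (dstep (prev :: rest)) (j - 1) (by push_cast at hj ⊢; omega) hlen'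

-- ===== VERDICT (by name: the statement is the Claim_ definition above) =====
theorem smth_spec : Claim_equal_smth := by
  intro y j _ hpre
  obtain ⟨h1, h2⟩ := hpre
  unfold Spec_smth
  exact smth_eq_alt (j.toNat - 1) y j (by omega) h2
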